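-- pv_equiv track=rewrite | github.com/Mvk122/Leetcode-Solutions | bending.py | is_receding
-- ===== SOURCE A (Python) =====
-- def is_receding(s):
--     for i, e in enumerate(s):
--         if i == 0:
--             continue
--         else:
--             if ord(e) > ord(s[i-1]):
--                 return False
--     return True
-- ===== SOURCE B (Python) =====
-- def is_receding(s):
--     # s is non-increasing iff it equals the descending sort of its own characters
--     return list(s) == sorted(s, reverse=True)
-- ===== Notes on version B (the rewrite author's own statement) =====
-- stated objective: alternative
-- what changed: replaces the indexed adjacent-pair scan with a canonicalization check: the string is non-increasing iff it equals the descending sort of its own characters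
import Mathlib
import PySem

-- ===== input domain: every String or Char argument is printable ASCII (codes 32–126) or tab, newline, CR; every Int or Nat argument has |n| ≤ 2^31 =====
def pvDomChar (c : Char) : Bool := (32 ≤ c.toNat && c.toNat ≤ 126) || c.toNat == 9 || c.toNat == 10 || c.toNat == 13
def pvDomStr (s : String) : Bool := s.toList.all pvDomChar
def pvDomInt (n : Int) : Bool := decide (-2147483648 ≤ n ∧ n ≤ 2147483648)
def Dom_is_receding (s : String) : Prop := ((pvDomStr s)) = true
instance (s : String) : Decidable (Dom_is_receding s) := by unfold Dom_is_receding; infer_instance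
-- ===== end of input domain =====

-- B replaces A's indexed adjacent-pair scan by a canonicalization check (string equals the
-- descending sort of its characters); alternative decomposition, not claimed faster.


-- ===== PORT A =====
-- the for-loop over enumerate(s); early 'return False' becomes returning false
def isRecedingLoop (xs : List Char) : List (Int × Char) → Bool
  | [] => true
  | (i, e) :: rest =>
    if i == 0 then isRecedingLoop xs rest
    else
      match PySem.List.pyGet? xs (i - 1) with
      | some p => if e.toNat > p.toNat then false else isRecedingLoop xs rest
      | none => false   -- unreachable: i-1 is always in range here (Python would raise)

def is_receding (s : String) : Bool :=
  isRecedingLoop s.toList (PySem.List.enumerate s.toList)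

-- ===== PORT B =====
def is_receding_alt (s : String) : Bool :=
  decide (s.toList = PySem.List.sorted s.toList (fun c => c) true)

-- ===== PRECONDITION & SPEC =====
def Spec_is_receding (s : String) (out : Bool) : Prop := out = is_receding_alt s
instance (s : String) (out : Bool) : Decidable (Spec_is_receding s out) := by unfold Spec_is_receding; infer_instance

-- ===== CLAIM (what is proved, stated in full; the proofs are below) =====
def Claim_equal_is_receding : Prop := ∀ (s : String), Dom_is_receding s → Spec_is_receding s (is_receding s)

-- ===== LEMMAS AND PROOFS =====

-- A's loop on the tail enumerated from a.length + 1 tests exactly the adjacent-pair chain on p :: l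
theorem isRecedingLoop_chain (l : List Char) : ∀ (a : List Char) (p : Char) (xs : List Char),
    xs = a ++ p :: l →
    (isRecedingLoop xs (PySem.List.enumerate l ((a.length : Int) + 1)) = true ↔
      List.IsChain (fun x y : Char => y.toNat ≤ x.toNat) (p :: l)) := by
  induction l with
  | nil =>
    intro a p xs _
    simp [isRecedingLoop, PySem.List.enumerate]
  | cons c l' ih =>
    intro a p xs hxs
    rw [PySem.List.enumerate_cons]
    have hne : (((a.length : Int) + 1) == 0) = false := by
      simp only [beq_eq_false_iff_ne, ne_eq]; omega
    have hidx : (a.length : Int) + 1 - 1 = (a.length : Int) := by omega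
    have hget : PySem.List.pyGet? xs ((a.length : Int) + 1 - 1) = some p := by
      rw [hidx, hxs]
      exact PySem.List.pyGet?_append_length a (c :: l') p
    have hstep : (a.length : Int) + 1 + 1 = ((a ++ [p]).length : Int) + 1 := by
      simp
    have hxs' : xs = (a ++ [p]) ++ c :: l' := by simp [hxs]
    rw [isRecedingLoop, hne, hget]
    show (if c.toNat > p.toNat then false
        else isRecedingLoop xs (PySem.List.enumerate l' ((a.length : Int) + 1 + 1))) = true ↔
      List.IsChain (fun x y : Char => y.toNat ≤ x.toNat) (p :: c :: l')
    by_cases hc : c.toNat > p.toNat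
    · rw [if_pos hc]
      simp only [Bool.false_eq_true, false_iff]
      rw [List.isChain_cons_cons]
      intro h
      omega
    · rw [if_neg hc, hstep, ih (a ++ [p]) c xs hxs', List.isChain_cons_cons]
      constructor
      · intro h; exact ⟨by omega, h⟩
      · intro h; exact h.2

theorem is_receding_eq_chain (s : String) :
    is_receding s = true ↔ List.IsChain (fun x y : Char => y.toNat ≤ x.toNat) s.toList := by
  unfold is_receding
  cases h : s.toList with
  | nil => simp [isRecedingLoop, PySem.List.enumerate]
  | cons x rest =>
    rw [PySem.List.enumerate_cons, isRecedingLoop]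
    simp only [beq_self_eq_true, if_true]
    have h0 : (0 : Int) + 1 = (([] : List Char).length : Int) + 1 := by simp
    rw [h0, isRecedingLoop_chain rest [] x (x :: rest) rfl]

theorem char_le_iff (x y : Char) : x ≤ y ↔ x.toNat ≤ y.toNat := by
  rfl

theorem chain_iff_pairwise_char (l : List Char) :
    List.IsChain (fun x y : Char => y.toNat ≤ x.toNat) l ↔
      List.Pairwise (fun x y : Char => y.toNat ≤ x.toNat) l := by
  haveI : Trans (fun x y : Char => y.toNat ≤ x.toNat)
      (fun x y : Char => y.toNat ≤ x.toNat) (fun x y : Char => y.toNat ≤ x.toNat) :=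
    ⟨fun h1 h2 => by omega⟩
  exact List.isChain_iff_pairwise

theorem is_receding_spec : Claim_equal_is_receding := by
  intro s _
  unfold Spec_is_receding is_receding_alt
  by_cases h : List.IsChain (fun x y : Char => y.toNat ≤ x.toNat) s.toList
  · have hb : is_receding s = true := (is_receding_eq_chain s).mpr h
    have hp : s.toList.Pairwise (fun x y : Char => (y : Char) ≤ (x : Char)) :=
      ((chain_iff_pairwise_char s.toList).mp h).imp (fun hxy => (char_le_iff _ _).mpr hxy)
    have hs : PySem.List.sorted s.toList (fun c => c) true = s.toList :=
      PySem.List.sorted_rev_eq_self_of_pairwise _ _ hp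
    simp [hb, hs]
  · have hb : is_receding s = false := by
      cases hr : is_receding s
      · rfl
      · exact absurd ((is_receding_eq_chain s).mp hr) h
    have hs : ¬ (s.toList = PySem.List.sorted s.toList (fun c => c) true) := by
      intro heq
      apply h
      have hp := PySem.List.sorted_pairwise_rev (xs := s.toList) (key := fun c : Char => c)
      rw [← heq] at hp
      exact (chain_iff_pairwise_char s.toList).mpr
        (hp.imp (fun hxy => (char_le_iff _ _).mp hxy))
    simp [hb, hs]
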